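-- pv_equiv track=rewrite | github.com/JudeKLevine/Defi-turing | Defi Turing37.py | retire_droite
-- ===== SOURCE A (Python) =====
-- def liste(n):
--     L = [int(i) for i in str(n)]
--     return L
--
-- def retire_droite(n):
--     A = []
--     a = len(str(n))
--     for i in range(1,a+1):
--         B = liste(n)
--         C = []
--         for k in range(i-1,a):
--             C.append(str(B[k]))
--         C = "".join(C)
--         A.append(int(C))
--     return A
-- ===== SOURCE B (Python) =====
-- def retire_droite(n):
--     out = []
--     s = str(n)
--     while s:
--         out.append(int(s))
--         s = s[1:]
--     return out
-- ===== Notes on version B (the rewrite author's own statement) =====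
-- stated objective: simpler
-- what changed: B peels suffixes off the front of str(n) in one loop (int(s); s = s[1:]) instead of re-parsing the whole number into a digit list, re-stringifying each digit, joining and re-parsing for every suffix.
import Mathlib
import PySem

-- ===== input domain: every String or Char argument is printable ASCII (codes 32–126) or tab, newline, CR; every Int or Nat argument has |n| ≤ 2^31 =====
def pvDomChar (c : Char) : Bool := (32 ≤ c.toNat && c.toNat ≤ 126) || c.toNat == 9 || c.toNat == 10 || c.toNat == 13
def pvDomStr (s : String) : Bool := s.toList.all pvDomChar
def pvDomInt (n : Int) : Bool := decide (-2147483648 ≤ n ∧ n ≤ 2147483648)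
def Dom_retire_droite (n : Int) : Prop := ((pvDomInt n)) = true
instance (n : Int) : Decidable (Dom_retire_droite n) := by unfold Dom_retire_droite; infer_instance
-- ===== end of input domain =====

-- B peels the suffixes off the front of str(n) directly (int(s); s = s[1:]) instead of
-- rebuilding each suffix from a freshly parsed digit list via str/join/int: simpler, one loop.

-- ===== PORT A =====
def pvListe (n : Int) : List Int :=
  (PySem.Int.toStr n).toList.map (fun c => (PySem.Int.ofStr? (String.ofList [c])).getD 0)

def retire_droite (n : Int) : List Int :=
  (PySem.List.pyRange 1 (PySem.Str.len (PySem.Int.toStr n) + 1) 1).foldl (fun A i =>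
    A ++ [(PySem.Int.ofStr? (PySem.Str.join ""
      ((PySem.List.pyRange (i - 1) (PySem.Str.len (PySem.Int.toStr n)) 1).foldl (fun C k =>
        C ++ [PySem.Int.toStr (PySem.List.pyGetD (pvListe n) k 0)]) []))).getD 0]) []

-- ===== PORT B =====
-- the 'while s: out.append(int(s)); s = s[1:]' loop, as structural recursion on the chars
def pvPeel : List Char → List Int
  | [] => []
  | c :: cs => (PySem.Int.ofStr? (String.ofList (c :: cs))).getD 0 :: pvPeel cs

def retire_droite_alt (n : Int) : List Int :=
  pvPeel (PySem.Int.toStr n).toList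

-- ===== PRECONDITION & SPEC =====
-- Pre_ excludes negative n, where A raises ValueError (liste parses the sign character with int('-')).
def Pre_retire_droite (n : Int) : Prop := 0 ≤ n
instance (n : Int) : Decidable (Pre_retire_droite n) := by unfold Pre_retire_droite; infer_instance
def pvWitness_retire_droite : Int := (120)

def Spec_retire_droite (n : Int) (out : List Int) : Prop := out = retire_droite_alt n
instance (n : Int) (out : List Int) : Decidable (Spec_retire_droite n out) := by unfold Spec_retire_droite; infer_instance

-- ===== CLAIM (what is proved, stated in full; the proofs are below) =====
def Claim_equal_retire_droite : Prop := ∀ (n : Int), Dom_retire_droite n → Pre_retire_droite n → Spec_retire_droite n (retire_droite n)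

-- ===== LEMMAS AND PROOFS =====

theorem digit_cases (c : Char) (h : c.isDigit = true) :
    c = Char.ofNat 48 ∨ c = Char.ofNat 49 ∨ c = Char.ofNat 50 ∨ c = Char.ofNat 51 ∨
    c = Char.ofNat 52 ∨ c = Char.ofNat 53 ∨ c = Char.ofNat 54 ∨ c = Char.ofNat 55 ∨
    c = Char.ofNat 56 ∨ c = Char.ofNat 57 := by
  have h1 : 48 ≤ c.toNat ∧ c.toNat ≤ 57 := by
    simp [Char.isDigit, UInt32.le_iff_toNat_le] at h
    exact ⟨h.1, h.2⟩
  have h2 := Char.ofNat_toNat c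
  have h3 : c.toNat = 48 ∨ c.toNat = 49 ∨ c.toNat = 50 ∨ c.toNat = 51 ∨ c.toNat = 52 ∨
      c.toNat = 53 ∨ c.toNat = 54 ∨ c.toNat = 55 ∨ c.toNat = 56 ∨ c.toNat = 57 := by omega
  rcases h3 with h3|h3|h3|h3|h3|h3|h3|h3|h3|h3 <;> rw [h3] at h2 <;> simp [← h2]

-- str(int(c)) = c for a single digit char
theorem digit_roundtrip (c : Char) (h : c.isDigit = true) :
    PySem.Int.toStr ((PySem.Int.ofStr? (String.ofList [c])).getD 0) = String.ofList [c] := by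
  rcases digit_cases c h with rfl|rfl|rfl|rfl|rfl|rfl|rfl|rfl|rfl|rfl <;> decide

-- the 'append one element per iteration' loop shape
theorem foldl_append_map {α β : Type} (g : α → β) :
    ∀ (l : List α) (acc : List β),
      l.foldl (fun A x => A ++ [g x]) acc = acc ++ l.map g := by
  intro l
  induction l with
  | nil => simp
  | cons x l ih => intro acc; simp [List.foldl_cons, ih]

-- B's peeling loop, characterised by suffix index
theorem pvPeel_eq_map (cs : List Char) :
    pvPeel cs = (List.range cs.length).map
      (fun j => (PySem.Int.ofStr? (String.ofList (cs.drop j))).getD 0) := by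
  induction cs with
  | nil => simp [pvPeel]
  | cons c cs ih =>
      simp [pvPeel, List.range_succ_eq_map, List.map_map, ih]

theorem map_range_getD_drop {α : Type} (cs : List α) (d : α) (j : Nat) :
    (List.range (cs.length - j)).map (fun t => cs.getD (j + t) d) = cs.drop j := by
  apply List.ext_getElem
  · simp
  · intro t h1 h2
    simp only [List.getElem_map, List.getElem_range, List.getElem_drop]
    rw [List.getD_eq_getElem]

theorem pyRange_eq_map (a b : Int) (hab : a ≤ b) :
    PySem.List.pyRange a b 1 = (List.range (b - a).toNat).map (fun (k : Nat) => a + (k : Int)) := by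
  simp only [PySem.List.pyRange]
  norm_num
  by_cases h : a < b
  · rw [if_pos h]
  · have hz : b - a = 0 := by omega
    rw [if_neg h, hz]
    simp

-- ===== VERDICT (by name: the statement is the Claim_ definition above) =====
theorem retire_droite_spec : Claim_equal_retire_droite := by
  intro n _ hpre
  unfold Spec_retire_droite retire_droite retire_droite_alt
  -- the characters of str(n) for n ≥ 0
  set cs : List Char := (PySem.Int.toStr n).toList with hcs
  have hchars : cs = Nat.toDigits 10 n.toNat := by
    rw [hcs, PySem.Int.toList_toStr]
    simp [PySem.Int.toChars, not_lt.mpr hpre]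
  have hdig : ∀ c ∈ cs, c.isDigit = true := by
    intro c hc
    rw [hchars] at hc
    exact Nat.isDigit_of_mem_toDigits (by norm_num) (by norm_num) hc
  have hne : 0 < cs.length := by rw [hchars]; exact Nat.length_toDigits_pos
  -- the outer range
  have ha : PySem.Str.len (PySem.Int.toStr n) = (cs.length : Int) := by
    simp [PySem.Str.len, hcs]
  rw [ha]
  have houter : PySem.List.pyRange 1 ((cs.length : Int) + 1) 1 =
      (List.range cs.length).map (fun (k : Nat) => 1 + (k : Int)) := by
    rw [pyRange_eq_map 1 ((cs.length : Int) + 1) (by omega)]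
    norm_num
  rw [houter, foldl_append_map, List.nil_append, List.map_map, pvPeel_eq_map]
  apply List.ext_getElem
  · simp
  · intro j hj1 hj2
    simp only [List.getElem_map, List.getElem_range, Function.comp_apply]
    -- the inner loop for i = 1 + j builds the suffix cs.drop j
    have hB : pvListe n = cs.map (fun c => (PySem.Int.ofStr? (String.ofList [c])).getD 0) := by
      simp [pvListe, hcs]
    have hinner : PySem.List.pyRange (1 + (j : Int) - 1) (cs.length : Int) 1 =
        (List.range (cs.length - j)).map (fun (t : Nat) => (j : Int) + (t : Int)) := by
      have hj : j < cs.length := by simpa using hj1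
      have : (1 : Int) + (j : Int) - 1 = (j : Int) := by omega
      rw [this, pyRange_eq_map (j : Int) (cs.length : Int) (by omega)]
      have h2 : ((cs.length : Int) - (j : Int)).toNat = cs.length - j := by omega
      rw [h2]
    rw [hinner, foldl_append_map, List.nil_append, List.map_map]
    have hj' : j < cs.length := by simpa using hj1
    have hmap : ((List.range (cs.length - j)).map
        ((fun k => PySem.Int.toStr (PySem.List.pyGetD (pvListe n) k 0)) ∘ fun (t : Nat) => (j : Int) + (t : Int)))
        = (List.range (cs.length - j)).map (fun t => String.ofList [cs.getD (j + t) ' ']) := by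
      apply List.map_congr_left
      intro t ht
      simp only [List.mem_range] at ht
      have hjt : j + t < cs.length := by omega
      have hcast : (j : Int) + (t : Int) = ((j + t : Nat) : Int) := by push_cast; ring
      simp only [Function.comp_apply, hcast, PySem.List.pyGetD_natCast, hB]
      rw [List.getD_eq_getElem _ _ (by simpa using hjt), List.getElem_map]
      rw [digit_roundtrip _ (hdig _ (List.getElem_mem _))]
      rw [List.getD_eq_getElem _ _ hjt]
    rw [hmap]
    -- ''.join of the singleton strings is the suffix itself
    have hjoin : PySem.Str.join "" ((List.range (cs.length - j)).map
        (fun t => String.ofList [cs.getD (j + t) ' '])) = String.ofList (cs.drop j) := by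
      have h1 : (PySem.Str.join "" ((List.range (cs.length - j)).map
          (fun t => String.ofList [cs.getD (j + t) ' ']))).toList = cs.drop j := by
        rw [PySem.Str.toList_join, List.map_map]
        have h2 : ((List.range (cs.length - j)).map
            (String.toList ∘ fun t => String.ofList [cs.getD (j + t) ' ']))
            = ((List.range (cs.length - j)).map (fun t => cs.getD (j + t) ' ')).map (fun c => [c]) := by
          simp [List.map_map]
        rw [h2, map_range_getD_drop cs ' ' j]
        simpa using PySem.Chars.join_nil_singletons (cs.drop j)
      calc PySem.Str.join "" ((List.range (cs.length - j)).map
            (fun t => String.ofList [cs.getD (j + t) ' ']))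
          = String.ofList ((PySem.Str.join "" ((List.range (cs.length - j)).map
            (fun t => String.ofList [cs.getD (j + t) ' ']))).toList) := String.ofList_toList.symm
        _ = String.ofList (cs.drop j) := by rw [h1]
    rw [hjoin]
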